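-- pv_equiv track=rewrite | github.com/jpvargasdev/MachineSpiritTimetable | send_text.py | _render_page
-- ===== SOURCE A (Python) =====
-- CHAR_SPACING = 2  # pixels between characters (1x)
--
-- LEFT_MARGIN = 2   # left margin on each page
--
-- FONT_HEIGHT = 7
--
-- DISPLAY_ROWS = 16
--
-- PAGE_WIDTH = 32   # bits per page
--
-- V_OFFSETS = {1: 4, 2: 1}
--
-- def _render_page(glyphs: list[tuple[int, list[int]]], scale: int = 1) -> list[int]:
--     """Render a list of glyphs into a single 32-column page.
--
--     Args:
--         glyphs: List of (width, [7 rows]) tuples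
--         scale: 1 = normal, 2 = double each pixel
--
--     Returns list of 16 uint32 values (LSB = leftmost column).
--     """
--     rows = [0] * DISPLAY_ROWS
--     v_offset = V_OFFSETS.get(scale, 4)
--     char_spacing = CHAR_SPACING * scale
--     col = LEFT_MARGIN  # current column position
--
--     for glyph_width, glyph_rows in glyphs:
--         for font_row_idx in range(FONT_HEIGHT):
--             glyph_val = glyph_rows[font_row_idx]
--             for sy in range(scale):
--                 display_row = v_offset + font_row_idx * scale + sy
--                 if display_row >= DISPLAY_ROWS:
--                     break
--                 # glyph_val: MSB = leftmost pixel within glyph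
--                 for bit in range(glyph_width):
--                     if glyph_val & (1 << (glyph_width - 1 - bit)):
--                         for sx in range(scale):
--                             pixel_col = col + bit * scale + sx
--                             if pixel_col < PAGE_WIDTH:
--                                 rows[display_row] |= (1 << pixel_col)
--         col += glyph_width * scale + char_spacing
--
--     return rows
-- ===== SOURCE B (Python) =====
-- CHAR_SPACING = 2
-- LEFT_MARGIN = 2
-- FONT_HEIGHT = 7
-- DISPLAY_ROWS = 16
-- PAGE_WIDTH = 32
-- V_OFFSETS = {1: 4, 2: 1}
--
-- def _render_page(glyphs: list[tuple[int, list[int]]], scale: int = 1) -> list[int]: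
--     """Render glyphs into one 32-column page, one precomputed row-mask per font row."""
--     rows = [0] * DISPLAY_ROWS
--     if scale <= 0:
--         return rows  # nothing to draw
--     v_offset = V_OFFSETS.get(scale, 4)
--     clip = (1 << PAGE_WIDTH) - 1
--     unit = (1 << scale) - 1          # one glyph pixel spans `scale` columns
--     col = LEFT_MARGIN
--     for glyph_width, glyph_rows in glyphs:
--         for i in range(FONT_HEIGHT):
--             v = glyph_rows[i]
--             mask = 0                 # whole scaled row of this glyph, bit-reversed (LSB = leftmost)
--             for b in range(glyph_width):
--                 if v & (1 << (glyph_width - 1 - b)):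
--                     mask |= unit << (b * scale)
--             stamp = (mask << col) & clip
--             start = v_offset + i * scale
--             for dr in range(start, min(start + scale, DISPLAY_ROWS)):
--                 rows[dr] |= stamp
--         col += glyph_width * scale + CHAR_SPACING * scale
--     return rows
-- ===== Notes on version B (the rewrite author's own statement) =====
-- stated objective: alternative
-- what changed: A sets pixels one by one (per display row, per glyph bit, per horizontal scale step); B builds one bit-reversed scale-expanded integer mask per font row, clips it with a shift-and-AND, and ORs that single stamp into each affected display row.
import Mathlib
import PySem

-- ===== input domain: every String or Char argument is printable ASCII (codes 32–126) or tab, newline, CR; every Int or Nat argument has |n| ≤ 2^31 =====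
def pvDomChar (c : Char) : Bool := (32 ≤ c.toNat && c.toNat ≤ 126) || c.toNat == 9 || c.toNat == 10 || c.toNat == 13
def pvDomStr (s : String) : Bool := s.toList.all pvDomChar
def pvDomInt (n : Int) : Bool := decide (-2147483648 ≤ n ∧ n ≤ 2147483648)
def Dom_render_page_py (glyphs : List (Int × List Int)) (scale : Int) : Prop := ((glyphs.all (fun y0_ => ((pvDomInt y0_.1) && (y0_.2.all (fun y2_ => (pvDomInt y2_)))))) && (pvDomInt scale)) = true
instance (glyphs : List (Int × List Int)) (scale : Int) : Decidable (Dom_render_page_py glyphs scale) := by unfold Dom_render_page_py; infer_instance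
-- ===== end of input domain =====

-- B replaces A's per-pixel inner loops by one precomputed integer stamp per font row (objective: alternative algorithm, same result).
-- ===== PORT A =====
-- the inner `for bit in range(glyph_width): … for sx in range(scale): …` loops, updating rows[dr];
-- shift exponents use .toNat: they are nonnegative wherever Python does not raise (negative shifts are outside Pre_)
def aBitLoop (v w s c dr : Int) (rows : List Int) : List Int :=
  (PySem.List.pyRange 0 w 1).foldl (fun rows bit =>
    if PySem.Int.band v ((1 : Int) <<< (w - 1 - bit).toNat) ≠ 0 then
      (PySem.List.pyRange 0 s 1).foldl (fun rows sx =>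
        if c + bit * s + sx < 32 then
          PySem.List.pySetD rows dr
            (PySem.Int.bor (PySem.List.pyGetD rows dr 0) ((1 : Int) <<< (c + bit * s + sx).toNat))
        else rows) rows
    else rows) rows

-- the `for sy in range(scale): … if display_row >= DISPLAY_ROWS: break …` loop (recursion because of the break)
def aSyLoop (sys : List Int) (voff i s c w v : Int) (rows : List Int) : List Int :=
  match sys with
  | [] => rows
  | sy :: rest =>
      if 16 ≤ voff + i * s + sy then rows
      else aSyLoop rest voff i s c w v (aBitLoop v w s c (voff + i * s + sy) rows)

def render_page_py (glyphs : List (Int × List Int)) (scale : Int) : List Int :=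
  let rows : List Int := List.replicate 16 0
  let voff : Int := PySem.Dict.getD (PySem.Dict.ofList [((1 : Int), (4 : Int)), (2, 1)]) scale 4
  let spacing : Int := 2 * scale
  (glyphs.foldl (fun (st : List Int × Int) g =>
      ((PySem.List.pyRange 0 7 1).foldl (fun rows fi =>
          aSyLoop (PySem.List.pyRange 0 scale 1) voff fi scale st.2 g.1
            (PySem.List.pyGetD g.2 fi 0) rows) st.1,
       st.2 + g.1 * scale + spacing)) (rows, 2)).1

-- ===== PORT B =====
-- `mask`: the glyph row bit-reversed and scale-expanded, built by the `for b in range(glyph_width)` loop of Source B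
def bMask (v w s unit : Int) : Int :=
  (PySem.List.pyRange 0 w 1).foldl (fun m b =>
    if PySem.Int.band v ((1 : Int) <<< (w - 1 - b).toNat) ≠ 0 then
      PySem.Int.bor m (unit <<< (b * s).toNat)
    else m) 0

-- shift exponents use .toNat: they are nonnegative wherever Source B does not raise (negative shifts are outside Pre_)
def render_page_py_alt (glyphs : List (Int × List Int)) (scale : Int) : List Int :=
  let rows : List Int := List.replicate 16 0
  if scale ≤ 0 then rows
  else
    let voff : Int := PySem.Dict.getD (PySem.Dict.ofList [((1 : Int), (4 : Int)), (2, 1)]) scale 4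
    let clip : Int := ((1 : Int) <<< 32) - 1
    let unit : Int := ((1 : Int) <<< scale.toNat) - 1
    (glyphs.foldl (fun (st : List Int × Int) g =>
        ((PySem.List.pyRange 0 7 1).foldl (fun rows fi =>
            let stamp := PySem.Int.band (bMask (PySem.List.pyGetD g.2 fi 0) g.1 scale unit <<< st.2.toNat) clip
            let start := voff + fi * scale
            (PySem.List.pyRange start (min (start + scale) 16) 1).foldl (fun rows dr =>
              PySem.List.pySetD rows dr (PySem.Int.bor (PySem.List.pyGetD rows dr 0) stamp)) rows) st.1,
         st.2 + g.1 * scale + 2 * scale)) (rows, 2)).1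

-- ===== PRECONDITION & SPEC =====
-- Pre_ excludes glyphs with fewer than 7 row values (A raises IndexError there) and glyphs with negative
-- widths: the running column can then go negative and B's whole-row mask shift raises ValueError on every
-- later glyph (A may raise the same ValueError per pixel, or draw nothing on that column and return).
def Pre_render_page_py (glyphs : List (Int × List Int)) (scale : Int) : Prop :=
  ∀ g ∈ glyphs, 0 ≤ g.1 ∧ 7 ≤ g.2.length
instance (glyphs : List (Int × List Int)) (scale : Int) : Decidable (Pre_render_page_py glyphs scale) := by unfold Pre_render_page_py; infer_instance
def pvWitness_render_page_py : (List (Int × List Int)) × Int := ([(3, [7, 5, 7, 0, 1, 2, 4])], 1)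

def Spec_render_page_py (glyphs : List (Int × List Int)) (scale : Int) (out : List Int) : Prop := out = render_page_py_alt glyphs scale
instance (glyphs : List (Int × List Int)) (scale : Int) (out : List Int) : Decidable (Spec_render_page_py glyphs scale out) := by unfold Spec_render_page_py; infer_instance

-- ===== CLAIM (what is proved, stated in full; the proofs are below) =====
def Claim_equal_render_page_py : Prop := ∀ (glyphs : List (Int × List Int)) (scale : Int), Dom_render_page_py glyphs scale → Pre_render_page_py glyphs scale → Spec_render_page_py glyphs scale (render_page_py glyphs scale)

-- ===== LEMMAS AND PROOFS =====

def natInnerAux (c b s t : Nat) : Nat :=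
  (List.range t).foldl (fun a sx => if c + b * s + sx < 32 then a ||| 1 <<< (c + b * s + sx) else a) 0

def natInner (c b s : Nat) : Nat := natInnerAux c b s s

def natOrA (P : Nat → Bool) (w s c : Nat) : Nat :=
  (List.range w).foldl (fun a b => if P b then a ||| natInner c b s else a) 0

def natMask (P : Nat → Bool) (w s : Nat) : Nat :=
  (List.range w).foldl (fun m b => if P b then m ||| ((1 <<< s - 1) <<< (b * s)) else m) 0

theorem foldl_or_from {α : Type} (L : List α) (p : α → Prop) [DecidablePred p] (g : α → Nat) :
    ∀ r : Nat, L.foldl (fun a x => if p x then a ||| g x else a) r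
      = r ||| L.foldl (fun a x => if p x then a ||| g x else a) 0 := by
  induction L with
  | nil => intro r; simp
  | cons x L ih =>
    intro r
    simp only [List.foldl_cons]
    rw [ih (if p x then r ||| g x else r), ih (if p x then 0 ||| g x else 0)]
    by_cases hp : p x <;> simp [hp, Nat.or_assoc]

theorem testBit_foldl_or {α : Type} (L : List α) (p : α → Prop) [DecidablePred p] (g : α → Nat) (j : Nat) :
    (L.foldl (fun a x => if p x then a ||| g x else a) 0).testBit j
      = L.any (fun x => decide (p x) && (g x).testBit j) := by
  induction L with
  | nil => simp
  | cons x L ih =>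
    simp only [List.foldl_cons, List.any_cons]
    rw [foldl_or_from]
    by_cases hp : p x <;> simp [hp, Nat.testBit_or, ih]

theorem natKey (P : Nat → Bool) (w s c : Nat) :
    natOrA P w s c = (natMask P w s <<< c) &&& (1 <<< 32 - 1) := by
  apply Nat.eq_of_testBit_eq
  intro j
  simp only [natOrA, natMask, natInner, natInnerAux, testBit_foldl_or, Nat.testBit_and, Nat.testBit_shiftLeft,
    Nat.one_shiftLeft, Nat.testBit_two_pow, Nat.testBit_two_pow_sub_one]
  rw [Bool.eq_iff_iff]
  simp only [List.any_eq_true, List.mem_range, Bool.and_eq_true, decide_eq_true_eq]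
  constructor
  · rintro ⟨b, hb, hP, sx, hsx, hlt, hj⟩
    exact ⟨⟨by omega, b, hb, hP, by omega, by omega⟩, by omega⟩
  · rintro ⟨⟨hcj, b, hb, hP, h1, h2⟩, hj32⟩
    exact ⟨b, hb, hP, j - c - b * s, by omega, by omega, by omega⟩

theorem pyGetD_pySetD_self (rows : List Int) (dr v : Int) (hdr : 0 ≤ dr)
    (hl : dr < (rows.length : Int)) :
    PySem.List.pyGetD (PySem.List.pySetD rows dr v) dr 0 = v := by
  rw [PySem.List.pySetD_of_nonneg rows v hdr,
    PySem.List.pyGetD_eq_getElem _ _ hdr (by simp; omega)]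
  exact List.getElem_set_self (by simp; omega)

theorem pySetD_pySetD_self (rows : List Int) (dr a b : Int) (hdr : 0 ≤ dr) :
    PySem.List.pySetD (PySem.List.pySetD rows dr a) dr b = PySem.List.pySetD rows dr b := by
  rw [PySem.List.pySetD_of_nonneg rows a hdr, PySem.List.pySetD_of_nonneg _ b hdr,
    PySem.List.pySetD_of_nonneg rows b hdr, List.set_set]

theorem pySetD_pyGetD_self (rows : List Int) (dr : Int) (hdr : 0 ≤ dr)
    (hl : dr < (rows.length : Int)) :
    PySem.List.pySetD rows dr (PySem.List.pyGetD rows dr 0) = rows := by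
  rw [PySem.List.pySetD_of_nonneg rows _ hdr, PySem.List.pyGetD_eq_getElem _ _ hdr hl,
    List.set_getElem_self]

theorem foldl_set_at {α : Type} (dr : Int) (hdr : 0 ≤ dr) (L : List α)
    (upd : List Int → α → List Int) (φ : α → Int → Int)
    (h : ∀ (rs : List Int) x, dr < (rs.length : Int) →
      upd rs x = PySem.List.pySetD rs dr (φ x (PySem.List.pyGetD rs dr 0))) :
    ∀ rows : List Int, dr < (rows.length : Int) →
      L.foldl upd rows
        = PySem.List.pySetD rows dr (L.foldl (fun r x => φ x r) (PySem.List.pyGetD rows dr 0)) := by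
  induction L with
  | nil => intro rows hl; exact (pySetD_pyGetD_self rows dr hdr hl).symm
  | cons x L ih =>
    intro rows hl
    rw [List.foldl_cons, List.foldl_cons, h rows x hl,
      ih _ (by rw [PySem.List.length_pySetD]; exact hl),
      pyGetD_pySetD_self rows dr _ hdr hl, pySetD_pySetD_self rows dr _ _ hdr]

theorem foldl_cast_or {α : Type} (L : List α) (p q : α → Prop) [DecidablePred p] [DecidablePred q]
    (gI : α → Int → Int) (gN : α → Nat → Nat)
    (hpq : ∀ x ∈ L, p x ↔ q x)
    (hg : ∀ x ∈ L, ∀ n : Nat, gI x (n : Int) = ((gN x n : Nat) : Int)) :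
    ∀ rn : Nat, L.foldl (fun (r : Int) x => if p x then gI x r else r) (rn : Int)
      = ((L.foldl (fun r x => if q x then gN x r else r) rn : Nat) : Int) := by
  induction L with
  | nil => intro rn; rfl
  | cons x L ih =>
    intro rn
    have hx := hpq x (by simp)
    simp only [List.foldl_cons]
    by_cases hp : p x
    · rw [if_pos hp, if_pos (hx.mp hp), hg x (by simp),
        ih (fun y hy => hpq y (by simp [hy])) (fun y hy => hg y (by simp [hy]))]
    · rw [if_neg hp, if_neg (fun h => hp (hx.mpr h)),
        ih (fun y hy => hpq y (by simp [hy])) (fun y hy => hg y (by simp [hy]))]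

def Pb (v w : Int) (b : Nat) : Bool :=
  decide (PySem.Int.band v ((1 : Int) <<< (w - 1 - (b : Int)).toNat) ≠ 0)

theorem intCast_shl (m n : Nat) : ((m : Int) <<< n) = ((m <<< n : Nat) : Int) := rfl

theorem one_int_shl (n : Nat) : ((1 : Int) <<< n) = ((1 <<< n : Nat) : Int) := rfl

theorem sInner_cast (c bi s : Int) (hc : 0 ≤ c) (hb : 0 ≤ bi) (hs : 0 ≤ s) (rn : Nat) :
    (List.range s.toNat).foldl
      (fun (r : Int) (sx : Nat) => if c + bi * s + (sx : Int) < 32 then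
        PySem.Int.bor r ((1 : Int) <<< (c + bi * s + (sx : Int)).toNat) else r) (rn : Int)
    = ((rn ||| natInner c.toNat bi.toNat s.toNat : Nat) : Int) := by
  have hsum : ∀ sx : Nat, c + bi * s + (sx : Int)
      = ((c.toNat + bi.toNat * s.toNat + sx : Nat) : Int) := by
    intro sx
    push_cast [Int.toNat_of_nonneg hc, Int.toNat_of_nonneg hb, Int.toNat_of_nonneg hs]
    ring
  rw [foldl_cast_or _ _ (fun sx => c.toNat + bi.toNat * s.toNat + sx < 32) _
      (fun sx r => r ||| 1 <<< (c.toNat + bi.toNat * s.toNat + sx))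
      (fun sx _ => by rw [hsum sx]; norm_cast)
      (fun sx _ n => by rw [hsum sx, Int.toNat_natCast, one_int_shl, PySem.Int.bor_natCast])
      rn, foldl_or_from _ _ _ rn]
  rfl

theorem sBit_cast (v w s c : Int) (hs : 0 ≤ s) (hc : 0 ≤ c) (rn : Nat) :
    (List.range w.toNat).foldl
      (fun (r : Int) (bit : Nat) =>
        if PySem.Int.band v ((1 : Int) <<< (w - 1 - (bit : Int)).toNat) ≠ 0 then
          (List.range s.toNat).foldl (fun (r : Int) (sx : Nat) =>
            if c + (bit : Int) * s + (sx : Int) < 32 then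
              PySem.Int.bor r ((1 : Int) <<< (c + (bit : Int) * s + (sx : Int)).toNat)
            else r) r
        else r) (rn : Int)
    = ((rn ||| natOrA (Pb v w) w.toNat s.toNat c.toNat : Nat) : Int) := by
  rw [foldl_cast_or _ _ (fun b => Pb v w b = true) _
      (fun b r => r ||| natInner c.toNat b s.toNat)
      (fun b _ => by simp [Pb])
      (fun b _ n => by
        rw [sInner_cast c (b : Int) s hc (Int.natCast_nonneg b) hs n, Int.toNat_natCast])
      rn, foldl_or_from _ _ _ rn]
  rfl

theorem aBitLoop_eq (v w s c dr : Int) (hs : 0 ≤ s) (hc : 0 ≤ c) (hdr : 0 ≤ dr)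
    (rows : List Int) (hl : dr < (rows.length : Int)) (hnn : ∀ x ∈ rows, 0 ≤ x) :
    aBitLoop v w s c dr rows
      = PySem.List.pySetD rows dr (PySem.Int.bor (PySem.List.pyGetD rows dr 0)
          ((natOrA (Pb v w) w.toNat s.toNat c.toNat : Nat) : Int)) := by
  have hr0 : 0 ≤ PySem.List.pyGetD rows dr 0 := by
    rw [PySem.List.pyGetD_eq_getElem _ _ hdr hl]
    exact hnn _ (List.getElem_mem _)
  unfold aBitLoop
  simp only [PySem.List.pyRange_one, Int.sub_zero, zero_add, List.foldl_map]
  rw [foldl_set_at dr hdr _ _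
      (fun (bit : Nat) r =>
        if PySem.Int.band v ((1 : Int) <<< (w - 1 - (bit : Int)).toNat) ≠ 0 then
          (List.range s.toNat).foldl (fun (r : Int) (sx : Nat) =>
            if c + (bit : Int) * s + (sx : Int) < 32 then
              PySem.Int.bor r ((1 : Int) <<< (c + (bit : Int) * s + (sx : Int)).toNat)
            else r) r
        else r)
      ?hstep rows hl]
  · rw [← Int.toNat_of_nonneg hr0, sBit_cast v w s c hs hc, PySem.Int.bor_natCast]
  case hstep =>
    intro rs bit hrs
    beta_reduce
    by_cases hb : PySem.Int.band v ((1 : Int) <<< (w - 1 - (bit : Int)).toNat) ≠ 0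
    · rw [if_pos hb, if_pos hb,
        foldl_set_at dr hdr _ _
          (fun (sx : Nat) r =>
            if c + (bit : Int) * s + (sx : Int) < 32 then
              PySem.Int.bor r ((1 : Int) <<< (c + (bit : Int) * s + (sx : Int)).toNat)
            else r)
          ?hstep2 rs hrs]
      case hstep2 =>
        intro rs2 sx hrs2
        beta_reduce
        by_cases hcnd : c + (bit : Int) * s + (sx : Int) < 32
        · rw [if_pos hcnd, if_pos hcnd]
        · rw [if_neg hcnd, if_neg hcnd]
          exact (pySetD_pyGetD_self rs2 dr hdr hrs2).symm
    · rw [if_neg hb, if_neg hb]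
      exact (pySetD_pyGetD_self rs dr hdr hrs).symm

theorem bMask_eq (v w s : Int) (hs : 0 ≤ s) :
    bMask v w s ((1 : Int) <<< s.toNat - 1)
      = ((natMask (Pb v w) w.toNat s.toNat : Nat) : Int) := by
  unfold bMask
  simp only [PySem.List.pyRange_one, Int.sub_zero, zero_add, List.foldl_map]
  have h0 : ((0 : Nat) : Int) = 0 := rfl
  rw [← h0, foldl_cast_or _ _ (fun b => Pb v w b = true) _
      (fun b m => m ||| ((1 <<< s.toNat - 1) <<< (b * s.toNat)))
      (fun b _ => by simp [Pb])
      (fun b _ n => by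
        have hbs' : ((b : Int) * s) = ((b * s.toNat : Nat) : Int) := by
          push_cast [Int.toNat_of_nonneg hs]; ring
        have hbs : ((b : Int) * s).toNat = b * s.toNat := by
          rw [hbs', Int.toNat_natCast]
        have hu : (((1 : Int) <<< s.toNat) - (1 : Int)) = (((1 <<< s.toNat : Nat) - 1 : Nat) : Int) := by
          have h1 : (1 : Nat) ≤ 1 <<< s.toNat := by
            simp [Nat.one_shiftLeft, Nat.one_le_two_pow]
          rw [one_int_shl]
          omega
        rw [hbs, hu, intCast_shl, PySem.Int.bor_natCast])
      0]
  rfl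

theorem pySetD_nonneg (rows : List Int) (dr v : Int) (hv : 0 ≤ v) (hdr : 0 ≤ dr)
    (hnn : ∀ x ∈ rows, 0 ≤ x) : ∀ x ∈ PySem.List.pySetD rows dr v, 0 ≤ x := by
  intro x hx
  rw [PySem.List.pySetD_of_nonneg rows v hdr] at hx
  rcases List.mem_or_eq_of_mem_set hx with h | h
  · exact hnn x h
  · omega

theorem sy_eq (v w s c voff i : Int) (hs : 0 ≤ s) (hc : 0 ≤ c) (hvi : 0 ≤ voff) (hi : 0 ≤ i) :
    ∀ (n : Nat) (a : Int), 0 ≤ a → (s - a).toNat = n → ∀ rows : List Int, rows.length = 16 →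
      (∀ x ∈ rows, 0 ≤ x) →
      aSyLoop (PySem.List.pyRange a s 1) voff i s c w v rows
        = (PySem.List.pyRange (voff + i * s + a) (min (voff + i * s + s) 16) 1).foldl
            (fun rows dr => PySem.List.pySetD rows dr (PySem.Int.bor (PySem.List.pyGetD rows dr 0)
              ((natOrA (Pb v w) w.toNat s.toNat c.toNat : Nat) : Int))) rows := by
  have his : 0 ≤ i * s := mul_nonneg hi hs
  intro n
  induction n with
  | zero =>
    intro a ha h0 rows hlen hnn
    rw [PySem.List.pyRange_one_eq_nil (by omega),
      PySem.List.pyRange_one_eq_nil (min_le_of_left_le (by omega))]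
    rfl
  | succ n ih =>
    intro a ha h0 rows hlen hnn
    have has : a < s := by omega
    rw [PySem.List.pyRange_one_cons has]
    rw [aSyLoop]
    by_cases hbr : 16 ≤ voff + i * s + a
    · rw [if_pos hbr, PySem.List.pyRange_one_eq_nil (min_le_of_right_le (by omega))]
      rfl
    · have hlt : voff + i * s + a < min (voff + i * s + s) 16 := lt_min (by omega) (by omega)
      rw [if_neg hbr,
        aBitLoop_eq v w s c (voff + i * s + a) hs hc (by omega) rows (by omega) hnn,
        PySem.List.pyRange_one_cons hlt, List.foldl_cons,
        show voff + i * s + a + 1 = voff + i * s + (a + 1) from by ring]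
      exact ih (a + 1) (by omega) (by omega) _ (by rw [PySem.List.length_pySetD]; exact hlen)
        (pySetD_nonneg _ _ _ (by
          rw [PySem.Int.bor_of_nonneg (by
              rw [PySem.List.pyGetD_eq_getElem _ _ (by omega) (by omega)]
              exact hnn _ (List.getElem_mem _)) (Int.natCast_nonneg _)]
          exact Int.natCast_nonneg _) (by omega) hnn)

theorem pyGetD_nonneg (rows : List Int) (dr : Int) (hnn : ∀ x ∈ rows, 0 ≤ x) :
    0 ≤ PySem.List.pyGetD rows dr 0 := by
  by_cases h : PySem.Raise.InRange rows.length dr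
  · exact hnn _ (PySem.List.pyGetD_mem rows 0 h)
  · rw [PySem.List.pyGetD_of_none rows dr 0 ((PySem.List.pyGet?_eq_none_iff rows dr).mpr h)]

theorem U_fold_pres (S : Int) (hS : 0 ≤ S) :
    ∀ (L : List Int), (∀ dr ∈ L, 0 ≤ dr) → ∀ rows : List Int, (∀ x ∈ rows, 0 ≤ x) →
      (((L.foldl (fun rows dr => PySem.List.pySetD rows dr
          (PySem.Int.bor (PySem.List.pyGetD rows dr 0) S)) rows).length = rows.length)
        ∧ (∀ x ∈ L.foldl (fun rows dr => PySem.List.pySetD rows dr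
            (PySem.Int.bor (PySem.List.pyGetD rows dr 0) S)) rows, 0 ≤ x)) := by
  intro L
  induction L with
  | nil => exact fun _ rows hnn => ⟨rfl, hnn⟩
  | cons dr L ih =>
    intro hL rows hnn
    have hdr : 0 ≤ dr := hL dr (by simp)
    have hval : 0 ≤ PySem.Int.bor (PySem.List.pyGetD rows dr 0) S := by
      rw [PySem.Int.bor_of_nonneg (pyGetD_nonneg rows dr hnn) hS]
      exact Int.natCast_nonneg _
    have h2 := ih (fun y hy => hL y (by simp [hy])) (PySem.List.pySetD rows dr _)
      (pySetD_nonneg _ _ _ hval hdr hnn)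
    simp only [List.foldl_cons]
    exact ⟨h2.1.trans (PySem.List.length_pySetD _ _ _), h2.2⟩

theorem stamp_eq (v w s col : Int) (hs : 0 ≤ s) :
    PySem.Int.band (bMask v w s (((1 : Int) <<< s.toNat) - 1) <<< col.toNat)
        (((1 : Int) <<< 32) - 1)
      = ((natOrA (Pb v w) w.toNat s.toNat col.toNat : Nat) : Int) := by
  rw [bMask_eq v w s hs, intCast_shl,
    show (((1 : Int) <<< 32) - (1 : Int)) = ((1 <<< 32 - 1 : Nat) : Int) from by decide,
    PySem.Int.band_natCast, natKey]

theorem font_fold_eq (scale voff col : Int) (g : Int × List Int)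
    (hs : 0 < scale) (hvi : 0 ≤ voff) (hcol : 0 ≤ col) :
    ∀ (L : List Int), (∀ fi ∈ L, 0 ≤ fi) → ∀ rows : List Int, rows.length = 16 →
      (∀ x ∈ rows, 0 ≤ x) →
      (L.foldl (fun rows fi =>
          aSyLoop (PySem.List.pyRange 0 scale 1) voff fi scale col g.1
            (PySem.List.pyGetD g.2 fi 0) rows) rows
        = L.foldl (fun rows fi =>
            let stamp := PySem.Int.band
              (bMask (PySem.List.pyGetD g.2 fi 0) g.1 scale (((1 : Int) <<< scale.toNat) - 1) <<< col.toNat)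
              (((1 : Int) <<< 32) - 1)
            let start := voff + fi * scale
            (PySem.List.pyRange start (min (start + scale) 16) 1).foldl (fun rows dr =>
              PySem.List.pySetD rows dr
                (PySem.Int.bor (PySem.List.pyGetD rows dr 0) stamp)) rows) rows)
      ∧ ((L.foldl (fun rows fi =>
          aSyLoop (PySem.List.pyRange 0 scale 1) voff fi scale col g.1
            (PySem.List.pyGetD g.2 fi 0) rows) rows).length = 16)
      ∧ (∀ x ∈ L.foldl (fun rows fi =>
          aSyLoop (PySem.List.pyRange 0 scale 1) voff fi scale col g.1
            (PySem.List.pyGetD g.2 fi 0) rows) rows, 0 ≤ x) := by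
  intro L
  induction L with
  | nil => exact fun _ rows hlen hnn => ⟨rfl, hlen, hnn⟩
  | cons fi L ih =>
    intro hL rows hlen hnn
    have hfi : 0 ≤ fi := hL fi (by simp)
    set v := PySem.List.pyGetD g.2 fi 0 with hv
    have hstep : aSyLoop (PySem.List.pyRange 0 scale 1) voff fi scale col g.1 v rows
        = (PySem.List.pyRange (voff + fi * scale) (min (voff + fi * scale + scale) 16) 1).foldl
            (fun rows dr => PySem.List.pySetD rows dr (PySem.Int.bor (PySem.List.pyGetD rows dr 0)
              ((natOrA (Pb v g.1) g.1.toNat scale.toNat col.toNat : Nat) : Int))) rows := by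
      have := sy_eq v g.1 scale col voff fi (by omega) hcol hvi hfi (scale - 0).toNat 0
        le_rfl rfl rows hlen hnn
      rwa [add_zero] at this
    have hpres := U_fold_pres ((natOrA (Pb v g.1) g.1.toNat scale.toNat col.toNat : Nat) : Int)
      (Int.natCast_nonneg _)
      (PySem.List.pyRange (voff + fi * scale) (min (voff + fi * scale + scale) 16) 1)
      (fun dr hdr => by
        have h1 := (PySem.List.mem_pyRange_one.mp hdr)
        have h2 : 0 ≤ fi * scale := mul_nonneg hfi (by omega)
        omega)
      rows hnn
    have ihx := ih (fun y hy => hL y (by simp [hy])) _ (hstep ▸ hpres.1.trans hlen)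
      (hstep ▸ hpres.2)
    simp only [List.foldl_cons]
    refine ⟨?_, ihx.2.1, ihx.2.2⟩
    rw [ihx.1, hstep, stamp_eq v g.1 scale col (by omega)]

theorem glyph_eq (scale voff : Int) (hs : 0 < scale) (hvi : 0 ≤ voff) :
    ∀ (glyphs : List (Int × List Int)) (rows : List Int) (col : Int),
      rows.length = 16 → (∀ x ∈ rows, 0 ≤ x) → 0 ≤ col → (∀ g ∈ glyphs, 0 ≤ g.1) →
      glyphs.foldl (fun (st : List Int × Int) g =>
          ((PySem.List.pyRange 0 7 1).foldl (fun rows fi =>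
              aSyLoop (PySem.List.pyRange 0 scale 1) voff fi scale st.2 g.1
                (PySem.List.pyGetD g.2 fi 0) rows) st.1,
           st.2 + g.1 * scale + 2 * scale)) (rows, col)
        = glyphs.foldl (fun (st : List Int × Int) g =>
            ((PySem.List.pyRange 0 7 1).foldl (fun rows fi =>
                let stamp := PySem.Int.band
                  (bMask (PySem.List.pyGetD g.2 fi 0) g.1 scale (((1 : Int) <<< scale.toNat) - 1) <<< st.2.toNat)
                  (((1 : Int) <<< 32) - 1)
                let start := voff + fi * scale
                (PySem.List.pyRange start (min (start + scale) 16) 1).foldl (fun rows dr =>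
                  PySem.List.pySetD rows dr
                    (PySem.Int.bor (PySem.List.pyGetD rows dr 0) stamp)) rows) st.1,
             st.2 + g.1 * scale + 2 * scale)) (rows, col) := by
  intro glyphs
  induction glyphs with
  | nil => intro rows col _ _ _ _; rfl
  | cons g glyphs ih =>
    intro rows col hlen hnn hcol hpre
    have hg : 0 ≤ g.1 := (hpre g (by simp))
    have hfont := font_fold_eq scale voff col g hs hvi hcol (PySem.List.pyRange 0 7 1)
      (fun fi hfi => (PySem.List.mem_pyRange_one.mp hfi).1) rows hlen hnn
    simp only [List.foldl_cons]
    rw [← hfont.1]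
    exact ih _ _ hfont.2.1 hfont.2.2
      (by have := mul_nonneg hg (le_of_lt hs); omega)
      (fun y hy => hpre y (by simp [hy]))

theorem voff_nonneg (scale : Int) :
    0 ≤ PySem.Dict.getD (PySem.Dict.ofList [((1 : Int), (4 : Int)), (2, 1)]) scale 4 := by
  by_cases h1 : scale = 1
  · subst h1; decide
  · by_cases h2 : scale = 2
    · subst h2; decide
    · have : PySem.Dict.getD (PySem.Dict.ofList [((1 : Int), (4 : Int)), (2, 1)]) scale 4 = 4 := by
        simp [PySem.Dict.getD, PySem.Dict.ofList, PySem.Dict.update, PySem.Dict.empty,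
          PySem.Dict.insert, PySem.Dict.get?, List.find?,
          (by simp; omega : ((1 : Int) == scale) = false),
          (by simp; omega : ((2 : Int) == scale) = false)]
      omega

theorem fst_foldl_pair {α : Type} (L : List α) (h : (List Int × Int) → α → Int) :
    ∀ (r : List Int) (c : Int), (L.foldl (fun st g => (st.1, h st g)) (r, c)).1 = r := by
  induction L with
  | nil => intro r c; rfl
  | cons g L ih => intro r c; exact ih r _

theorem a_trivial (glyphs : List (Int × List Int)) (scale : Int) (hle : scale ≤ 0) :
    render_page_py glyphs scale = List.replicate 16 0 := by
  unfold render_page_py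
  simp only [PySem.List.pyRange_one_eq_nil hle, aSyLoop, List.foldl_fixed]
  exact fst_foldl_pair glyphs _ _ _

-- ===== VERDICT (by name: the statement is the Claim_ definition above) =====
theorem render_page_py_spec : Claim_equal_render_page_py := by
  intro glyphs scale _ hpre
  unfold Spec_render_page_py
  by_cases hle : scale ≤ 0
  · rw [a_trivial glyphs scale hle]
    simp [render_page_py_alt, hle]
  · have hpos : 0 < scale := by omega
    have hv := voff_nonneg scale
    simp only [render_page_py, render_page_py_alt, if_neg (not_le.mpr hpos)]
    exact congrArg Prod.fst
      (glyph_eq scale (PySem.Dict.getD (PySem.Dict.ofList [((1 : Int), (4 : Int)), (2, 1)]) scale 4)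
        hpos hv glyphs (List.replicate 16 0) 2 (by simp)
        (fun x hx => by rw [List.eq_of_mem_replicate hx])
        (by norm_num) (fun g hg => (hpre g hg).1))
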